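-- pv_equiv track=rewrite | github.com/AndreiLucaci/fp_postuniv | src/problems.py | is_hill
-- ===== SOURCE A (Python) =====
-- def is_hill(l):
--     '''
--     [1, 2, 3, 4, 3, 2, 1]
--     '''
--     '''
--     m1 - indexul de urcare
--     m2 - indexul de coborare
--     '''
--     m1, m2 = 0, 0
--
--     for i in range(1, len(l)):
--         if l[i - 1] < l[i] and m2 == 0:
--             m1 = i
--         elif l[i - 1] > l[i] and m1 != 0:
--             m2 = i
--         else:
--             return False
--     return m1 < m2
-- ===== SOURCE B (Python) =====
-- def is_hill(l):
--     n = len(l)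
--     i = 0
--     while i + 1 < n and l[i] < l[i + 1]:
--         i += 1
--     peak = i
--     while i + 1 < n and l[i] > l[i + 1]:
--         i += 1
--     return 0 < peak < n - 1 and i == n - 1
-- ===== Notes on version B (the rewrite author's own statement) =====
-- stated objective: simpler
-- what changed: Replaces the flag-driven loop over m1/m2 with two sequential monotone scans (advance through the strict ascent, record the peak, then advance through the strict descent) and a final index check.
import Mathlib
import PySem

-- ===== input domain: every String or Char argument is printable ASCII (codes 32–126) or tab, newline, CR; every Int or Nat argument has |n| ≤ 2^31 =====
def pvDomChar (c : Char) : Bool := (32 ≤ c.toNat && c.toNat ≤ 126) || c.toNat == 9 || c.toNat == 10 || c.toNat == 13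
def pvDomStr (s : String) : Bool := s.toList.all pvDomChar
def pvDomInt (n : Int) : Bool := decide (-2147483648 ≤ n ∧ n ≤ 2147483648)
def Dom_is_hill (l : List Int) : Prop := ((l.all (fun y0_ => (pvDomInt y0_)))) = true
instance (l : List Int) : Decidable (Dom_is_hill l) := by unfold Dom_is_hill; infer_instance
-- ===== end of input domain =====

-- B replaces A's flag-driven single loop by two sequential monotone scans (ascent, then descent); objective: simpler.


-- ===== PORT A =====
-- A's for-loop over range(1, len(l)) with state (m1, m2) and early 'return False';
-- indices i-1 and i are always in range, so l[i] is ported as l.getD i 0.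
def isHillGo (l : List Int) (m1 m2 i : Nat) : Bool :=
  if i < l.length then
    if l.getD (i-1) 0 < l.getD i 0 ∧ m2 = 0 then isHillGo l i m2 (i+1)
    else if l.getD (i-1) 0 > l.getD i 0 ∧ m1 ≠ 0 then isHillGo l m1 i (i+1)
    else false
  else decide (m1 < m2)
termination_by l.length - i
decreasing_by all_goals omega

def is_hill (l : List Int) : Bool := isHillGo l 0 0 1

-- ===== PORT B =====
-- B's first while-loop: advance i through the strict ascent.
def ascendGo (l : List Int) (i : Nat) : Nat :=
  if i + 1 < l.length ∧ l.getD i 0 < l.getD (i+1) 0 then ascendGo l (i+1) else i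
termination_by l.length - i
decreasing_by omega

-- B's second while-loop: advance i through the strict descent.
def descendGo (l : List Int) (i : Nat) : Nat :=
  if i + 1 < l.length ∧ l.getD i 0 > l.getD (i+1) 0 then descendGo l (i+1) else i
termination_by l.length - i
decreasing_by omega

def is_hill_alt (l : List Int) : Bool :=
  let peak := ascendGo l 0
  let i := descendGo l peak
  decide (0 < peak ∧ peak < l.length - 1 ∧ i = l.length - 1)

-- ===== PRECONDITION & SPEC =====
def Spec_is_hill (l : List Int) (out : Bool) : Prop := out = is_hill_alt l
instance (l : List Int) (out : Bool) : Decidable (Spec_is_hill l out) := by unfold Spec_is_hill; infer_instance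

-- ===== CLAIM (what is proved, stated in full; the proofs are below) =====
def Claim_equal_is_hill : Prop := ∀ (l : List Int), Dom_is_hill l → Spec_is_hill l (is_hill l)

-- ===== LEMMAS AND PROOFS =====

-- Down phase: state (m1 = p, m2 = i-1) at index i; result is true iff the descent reaches the end.
lemma isHillGo_down (l : List Int) : ∀ n i p, l.length - i ≤ n → 1 ≤ p → p + 2 ≤ i → i ≤ l.length →
    isHillGo l p (i-1) i = decide (descendGo l (i-1) + 1 = l.length) := by
  intro n
  induction n with
  | zero =>
    intro i p hf hp hpi hi
    have hi' : i = l.length := by omega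
    rw [isHillGo, descendGo]
    have h1 : ¬ (i < l.length) := by omega
    have h2 : ¬ (i - 1 + 1 < l.length ∧ l.getD (i-1) 0 > l.getD (i-1+1) 0) := by omega
    simp only [if_neg h1, if_neg h2]
    have : p < i - 1 := by omega
    simp [this]; omega
  | succ n ih =>
    intro i p hf hp hpi hi
    by_cases hlt : i < l.length
    · rw [isHillGo, if_pos hlt]
      have hm2 : ¬ (l.getD (i-1) 0 < l.getD i 0 ∧ (i-1 : Nat) = 0) := by
        rintro ⟨_, h⟩; omega
      rw [if_neg hm2]
      have hcan : i - 1 + 1 = i := by omega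
      by_cases hdesc : l.getD (i-1) 0 > l.getD i 0
      · rw [if_pos ⟨hdesc, by omega⟩]
        have := ih (i+1) p (by omega) hp (by omega) (by omega)
        simp only [Nat.add_sub_cancel] at this
        rw [this]
        conv_rhs => rw [descendGo]
        rw [if_pos (by rw [hcan]; exact ⟨hlt, hdesc⟩), hcan]
      · rw [if_neg (by rintro ⟨h, _⟩; exact hdesc h)]
        conv_rhs => rw [descendGo]
        rw [if_neg (by rw [hcan]; rintro ⟨_, h⟩; exact hdesc h)]
        have : ¬ (i - 1 + 1 = l.length) := by omega
        simp [this]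
    · rw [isHillGo, if_neg hlt, descendGo]
      have h2 : ¬ (i - 1 + 1 < l.length ∧ l.getD (i-1) 0 > l.getD (i-1+1) 0) := by omega
      rw [if_neg h2]
      have : p < i - 1 := by omega
      simp [this]; omega

-- Up phase: state (m1 = i-1, m2 = 0) at index i; result is true iff the ascent from i-1
-- reaches a positive interior peak and the descent from that peak reaches the end.
lemma isHillGo_up (l : List Int) : ∀ n i, l.length - i ≤ n → 1 ≤ i → i ≤ l.length →
    isHillGo l (i-1) 0 i = decide (0 < ascendGo l (i-1) ∧ ascendGo l (i-1) + 1 < l.length ∧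
      descendGo l (ascendGo l (i-1)) + 1 = l.length) := by
  intro n
  induction n with
  | zero =>
    intro i hf hi hil
    have hi' : i = l.length := by omega
    rw [isHillGo]
    have h1 : ¬ (i < l.length) := by omega
    rw [if_neg h1]
    conv_rhs => rw [ascendGo]
    have hcan : i - 1 + 1 = i := by omega
    rw [if_neg (by rw [hcan]; rintro ⟨h, _⟩; omega)]
    have : ¬ (i - 1 + 1 < l.length) := by omega
    simp [this]
  | succ n ih =>
    intro i hf hi hil
    by_cases hlt : i < l.length
    · rw [isHillGo, if_pos hlt]
      have hcan : i - 1 + 1 = i := by omega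
      by_cases hasc : l.getD (i-1) 0 < l.getD i 0
      · rw [if_pos ⟨hasc, rfl⟩]
        have := ih (i+1) (by omega) (by omega) (by omega)
        simp only [Nat.add_sub_cancel] at this
        rw [this]
        conv_rhs => rw [ascendGo]
        rw [if_pos (by rw [hcan]; exact ⟨hlt, hasc⟩), hcan]
      · rw [if_neg (by rintro ⟨h, _⟩; exact hasc h)]
        have hpeak : ascendGo l (i-1) = i - 1 := by
          rw [ascendGo, if_neg (by rw [hcan]; rintro ⟨_, h⟩; exact hasc h)]
        rw [hpeak]
        by_cases hdesc : l.getD (i-1) 0 > l.getD i 0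
        · by_cases hm1 : (i - 1 : Nat) ≠ 0
          · rw [if_pos ⟨hdesc, hm1⟩]
            have := isHillGo_down l (l.length - (i+1)) (i+1) (i-1) (by omega) (by omega) (by omega) (by omega)
            simp only [Nat.add_sub_cancel] at this
            rw [this]
            have hdstep : descendGo l (i-1) = descendGo l i := by
              conv_lhs => rw [descendGo]
              rw [if_pos (by rw [hcan]; exact ⟨hlt, hdesc⟩), hcan]
            rw [hdstep]
            have h01 : 0 < i - 1 := by omega
            simp [h01, hlt, hcan]
          · rw [if_neg (by rintro ⟨_, h⟩; exact h (by omega))]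
            have : ¬ (0 < i - 1) := by omega
            simp [this]
        · rw [if_neg (by rintro ⟨h, _⟩; exact hdesc h)]
          have hd : descendGo l (i-1) = i - 1 := by
            rw [descendGo, if_neg (by rw [hcan]; rintro ⟨_, h⟩; exact hdesc h)]
          rw [hd]
          have : ¬ (i - 1 + 1 = l.length) := by omega
          simp [this]
    · rw [isHillGo, if_neg hlt]
      conv_rhs => rw [ascendGo]
      have hcan : i - 1 + 1 = i := by omega
      rw [if_neg (by rw [hcan]; rintro ⟨h, _⟩; omega)]
      have : ¬ (i - 1 + 1 < l.length) := by omega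
      simp [this]

-- ===== VERDICT (by name: the statement is the Claim_ definition above) =====
theorem is_hill_spec : Claim_equal_is_hill := by
  intro l _
  unfold Spec_is_hill is_hill is_hill_alt
  by_cases hlen : l.length = 0
  · rw [isHillGo, if_neg (by omega)]
    rw [show ascendGo l 0 = 0 from by rw [ascendGo]; rw [if_neg (by omega)]]
    simp
  · have h := isHillGo_up l l.length 1 (by omega) le_rfl (by omega)
    simp only [Nat.sub_self] at h
    refine h.trans ?_
    simp only [decide_eq_decide]
    constructor
    · rintro ⟨h1, h2, h3⟩; exact ⟨h1, by omega, by omega⟩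
    · rintro ⟨h1, h2, h3⟩; exact ⟨h1, by omega, by omega⟩
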